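-- pv_equiv track=rewrite | github.com/BonnardValentin/argo | argos/ingestion/local_docs.py | _first_h1
-- ===== SOURCE A (Python) =====
-- def _first_h1(text: str) -> str | None:
--     """Return the first `# Header` line after any YAML frontmatter."""
--     in_frontmatter = False
--     frontmatter_closed = False
--     for i, raw_line in enumerate(text.splitlines()):
--         line = raw_line.strip()
--         # YAML frontmatter handling: opens and closes with a bare `---`
--         if i == 0 and line == "---":
--             in_frontmatter = True
--             continue
--         if in_frontmatter:
--             if line == "---":
--                 in_frontmatter = False
--                 frontmatter_closed = True
--             continue
--         if not line:
--             continue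
--         if line.startswith("# ") and not line.startswith("## "):
--             return line[2:].strip()
--         # First non-blank, non-H1 line → give up (title must lead).
--         if frontmatter_closed or i > 0:
--             return None
--     return None
-- ===== SOURCE B (Python) =====
-- def _h1_text(stripped):
--     """Return the H1 text of an already-stripped line, or None."""
--     if stripped.startswith("# ") and not stripped.startswith("## "):
--         return stripped[2:].strip()
--     return None
--
--
-- def _body_after_close(lines):
--     """Lines after the closing bare '---', or None if never closed."""
--     for j, raw in enumerate(lines):
--         if raw.strip() == "---":
--             return lines[j + 1:]
--     return None
--
--
-- def _scan_body(lines):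
--     """First non-blank line's H1 text, or None if it is not an H1."""
--     for raw in lines:
--         s = raw.strip()
--         if not s:
--             continue
--         return _h1_text(s)
--     return None
--
--
-- def _first_h1(text: str) -> str | None:
--     lines = text.splitlines()
--     if not lines:
--         return None
--     first = lines[0].strip()
--     if first == "---":
--         body = _body_after_close(lines[1:])
--         return None if body is None else _scan_body(body)
--     h1 = _h1_text(first)
--     if h1 is not None:
--         return h1
--     return _scan_body(lines[1:])
-- ===== Notes on version B (the rewrite author's own statement) =====
-- stated objective: simpler
-- what changed: Replaces the fused i/in_frontmatter/frontmatter_closed flag loop with three small phases: locate the body after the frontmatter (or after a free-pass first line), then one helper that scans the body skipping blanks and judges the first non-blank line.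
import Mathlib
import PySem

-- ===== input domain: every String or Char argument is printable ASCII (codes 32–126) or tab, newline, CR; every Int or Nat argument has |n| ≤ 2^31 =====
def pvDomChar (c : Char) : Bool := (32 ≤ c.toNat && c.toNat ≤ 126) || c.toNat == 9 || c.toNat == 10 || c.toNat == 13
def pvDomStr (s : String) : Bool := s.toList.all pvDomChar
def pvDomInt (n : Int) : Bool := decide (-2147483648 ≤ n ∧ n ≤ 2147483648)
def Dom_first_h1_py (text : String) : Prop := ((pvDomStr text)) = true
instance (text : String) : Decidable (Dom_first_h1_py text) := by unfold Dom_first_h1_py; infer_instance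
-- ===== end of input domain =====

-- B replaces A's fused flag loop by three small phases (find body, skip blanks, judge one line); objective: simpler.

-- ===== PORT A =====
-- the for-loop of A over enumerate(text.splitlines()) with its two flags, as structural recursion
def firstH1Loop : List String → Nat → Bool → Bool → Option String
  | [], _, _, _ => none
  | raw :: rest, i, infm, closed =>
    let line := PySem.Str.strip raw
    if i == 0 && line == "---" then firstH1Loop rest (i + 1) true closed
    else if infm then
      if line == "---" then firstH1Loop rest (i + 1) false true
      else firstH1Loop rest (i + 1) infm closed
    else if line == "" then firstH1Loop rest (i + 1) infm closed
    else if PySem.Str.startswith line "# " && !(PySem.Str.startswith line "## ") then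
      some (PySem.Str.strip (PySem.Str.slice line (some 2) none))
    else if closed || decide (0 < i) then none
    else firstH1Loop rest (i + 1) infm closed

def first_h1_py (text : String) : Option String :=
  firstH1Loop (PySem.Str.splitlines text) 0 false false

-- ===== PORT B =====
-- B helper: H1 text of an already-stripped line, or none
def h1Text (s : String) : Option String :=
  if PySem.Str.startswith s "# " && !(PySem.Str.startswith s "## ") then
    some (PySem.Str.strip (PySem.Str.slice s (some 2) none))
  else none

-- B helper: lines after the closing bare '---', or none if never closed
def bodyAfterClose : List String → Option (List String)
  | [] => none
  | raw :: rest =>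
    if PySem.Str.strip raw == "---" then some rest else bodyAfterClose rest

-- B helper: first non-blank line's H1 text, or none if it is not an H1
def scanBody : List String → Option String
  | [] => none
  | raw :: rest =>
    let s := PySem.Str.strip raw
    if s == "" then scanBody rest else h1Text s

def first_h1_py_alt (text : String) : Option String :=
  match PySem.Str.splitlines text with
  | [] => none
  | l0 :: rest =>
    let first := PySem.Str.strip l0
    if first == "---" then
      match bodyAfterClose rest with
      | none => none
      | some body => scanBody body
    else
      match h1Text first with
      | some h1 => some h1
      | none => scanBody rest

-- ===== PRECONDITION & SPEC =====
def Spec_first_h1_py (text : String) (out : Option String) : Prop := out = first_h1_py_alt text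
instance (text : String) (out : Option String) : Decidable (Spec_first_h1_py text out) := by unfold Spec_first_h1_py; infer_instance

-- ===== CLAIM (what is proved, stated in full; the proofs are below) =====
def Claim_equal_first_h1_py : Prop := ∀ (text : String), Dom_first_h1_py text → Spec_first_h1_py text (first_h1_py text)

-- ===== LEMMAS AND PROOFS =====

-- after the first line, with frontmatter not open, A's loop is exactly B's body scan
theorem firstH1Loop_tail (t : List String) (i : Nat) (closed : Bool) :
    firstH1Loop t (i + 1) false closed = scanBody t := by
  induction t generalizing i with
  | nil => simp [firstH1Loop, scanBody]
  | cons raw rest ih =>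
    simp only [firstH1Loop, scanBody]
    by_cases hb : PySem.Str.strip raw = ""
    · simp [hb, ih]
    · simp only [ih, h1Text]
      split_ifs <;> simp_all

-- inside unclosed-so-far frontmatter, A's loop is B's bodyAfterClose-then-scan
theorem firstH1Loop_fm (t : List String) (i : Nat) :
    firstH1Loop t (i + 1) true false =
      (match bodyAfterClose t with | none => none | some body => scanBody body) := by
  induction t generalizing i with
  | nil => simp [firstH1Loop, bodyAfterClose]
  | cons raw rest ih =>
    simp only [firstH1Loop, bodyAfterClose]
    by_cases hc : PySem.Str.strip raw = "---"
    · simp [hc, firstH1Loop_tail]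
    · simp [hc, ih]

-- ===== VERDICT (by name: the statement is the Claim_ definition above) =====
theorem first_h1_py_spec : Claim_equal_first_h1_py := by
  intro text _
  unfold Spec_first_h1_py first_h1_py first_h1_py_alt
  cases hls : PySem.Str.splitlines text with
  | nil => simp [firstH1Loop]
  | cons l0 rest =>
    simp only [firstH1Loop]
    by_cases hc : PySem.Str.strip l0 = "---"
    · simp [hc, firstH1Loop_fm]
    · by_cases hb : PySem.Str.strip l0 = ""
      · simp [hb, firstH1Loop_tail, h1Text,
          show PySem.Chars.startswith ([] : List Char) ['#', ' '] = false from by decide]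
      · simp only [h1Text, firstH1Loop_tail]
        split_ifs <;> simp_all
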